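-- pv_equiv track=rewrite | github.com/behrang-netauto/python-basics-for-netauto | examples/03_work_by_config_file/ex01_use_device_utils.function.py | iter_interface
-- ===== SOURCE A (Python) =====
-- def iter_interface(config_text: str):
--     lines = config_text.splitlines()
--     for i, line in enumerate(lines):
--         stripped = line.strip()
--         if stripped.startswith("interface "):
--             desc = "no description"
--
--             if i + 1 < len(lines):
--                 next_line = lines[i + 1].strip()
--                 if next_line.lower().startswith("description "):
--                     desc = next_line
--
--             yield stripped, desc
-- ===== SOURCE B (Python) =====
-- def iter_interface(config_text: str):
--     pending = None
--     for line in config_text.splitlines():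
--         stripped = line.strip()
--         if pending is not None:
--             if stripped.lower().startswith("description "):
--                 yield pending, stripped
--                 pending = None
--                 continue
--             yield pending, "no description"
--             pending = None
--         if stripped.startswith("interface "):
--             pending = stripped
--     if pending is not None:
--         yield pending, "no description"
-- ===== Notes on version B (the rewrite author's own statement) =====
-- stated objective: alternative
-- what changed: Replaced the index-based lookahead (lines[i+1] peek for each interface line) by a single forward pass that carries a pending interface line and resolves it when the next line arrives (or at end of input).
import Mathlib
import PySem

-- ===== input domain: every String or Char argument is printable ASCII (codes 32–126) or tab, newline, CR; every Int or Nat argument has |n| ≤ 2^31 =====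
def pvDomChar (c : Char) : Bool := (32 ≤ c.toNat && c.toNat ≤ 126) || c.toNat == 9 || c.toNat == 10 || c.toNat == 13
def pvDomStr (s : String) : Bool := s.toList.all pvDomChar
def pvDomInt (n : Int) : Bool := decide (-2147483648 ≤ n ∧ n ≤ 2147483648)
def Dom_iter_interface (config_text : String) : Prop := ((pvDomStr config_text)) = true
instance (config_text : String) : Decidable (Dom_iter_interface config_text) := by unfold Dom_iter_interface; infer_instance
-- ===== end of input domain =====

-- B replaces A's index-based lookahead (peeking lines[i+1]) by a single forward pass
-- carrying a pending interface line; same O(n) cost, different decomposition.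


-- ===== PORT A =====
-- the generator loop 'for i, line in enumerate(lines)' with its lines[i+1] lookahead,
-- as structural recursion on the index i
def iterA_go (lines : List String) (i : Nat) : List (String × String) :=
  if _h : i < lines.length then
    let line := lines.getD i ""
    let stripped := PySem.Str.strip line
    (if PySem.Str.startswith stripped "interface " then
      let desc :=
        if i + 1 < lines.length then
          let next_line := PySem.Str.strip (lines.getD (i + 1) "")
          if PySem.Str.startswith (PySem.Str.lower next_line) "description " then next_line
          else "no description"
        else "no description"
      [(stripped, desc)]
     else []) ++ iterA_go lines (i + 1)
  else []
termination_by lines.length - i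

def iter_interface (config_text : String) : List (String × String) :=
  iterA_go (PySem.Str.splitlines config_text) 0

-- ===== PORT B =====
-- single pass carrying the pending interface line (Source B's loop; the final flush is the [] case)
def iterB_go (pending : Option String) (lines : List String) : List (String × String) :=
  match lines with
  | [] =>
    match pending with
    | some p => [(p, "no description")]
    | none => []
  | line :: rest =>
    let stripped := PySem.Str.strip line
    match pending with
    | some p =>
      if PySem.Str.startswith (PySem.Str.lower stripped) "description " then
        (p, stripped) :: iterB_go none rest
      else
        (p, "no description") ::
          (if PySem.Str.startswith stripped "interface " then iterB_go (some stripped) rest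
           else iterB_go none rest)
    | none =>
      if PySem.Str.startswith stripped "interface " then iterB_go (some stripped) rest
      else iterB_go none rest

def iter_interface_alt (config_text : String) : List (String × String) :=
  iterB_go none (PySem.Str.splitlines config_text)

-- ===== PRECONDITION & SPEC =====
def Spec_iter_interface (config_text : String) (out : List (String × String)) : Prop := out = iter_interface_alt config_text
instance (config_text : String) (out : List (String × String)) : Decidable (Spec_iter_interface config_text out) := by unfold Spec_iter_interface; infer_instance

-- ===== CLAIM (what is proved, stated in full; the proofs are below) =====
def Claim_equal_iter_interface : Prop := ∀ (config_text : String), Dom_iter_interface config_text → Spec_iter_interface config_text (iter_interface config_text)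

-- ===== LEMMAS AND PROOFS =====

-- reference recursion: A's lookahead reformulated on the list structure
def descOf (rest : List String) : String :=
  match rest with
  | [] => "no description"
  | n :: _ =>
    let nl := PySem.Str.strip n
    if PySem.Str.startswith (PySem.Str.lower nl) "description " then nl else "no description"

def fA (lines : List String) : List (String × String) :=
  match lines with
  | [] => []
  | l :: rest =>
    let s := PySem.Str.strip l
    (if PySem.Str.startswith s "interface " then [(s, descOf rest)] else []) ++ fA rest

-- a line whose lowercase starts with "description " cannot start with "interface "
theorem desc_not_interface (cs : List Char)
    (h : PySem.Chars.startswith (PySem.Chars.lower cs)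
        ['d','e','s','c','r','i','p','t','i','o','n',' '] = true) :
    PySem.Chars.startswith cs ['i','n','t','e','r','f','a','c','e',' '] = false := by
  by_contra hI
  simp only [Bool.not_eq_false] at hI
  rw [PySem.Chars.startswith_iff] at hI h
  rcases hI with ⟨t2, h2⟩
  rcases h with ⟨t1, h1⟩
  have hi : cs.head? = some 'i' := by rw [← h2]; rfl
  have hd : (PySem.Chars.lower cs).head? = some 'd' := by rw [← h1]; rfl
  rw [PySem.Chars.lower, List.head?_map, hi] at hd
  exact absurd hd (by decide)

theorem iterB_fA (lines : List String) :
    iterB_go none lines = fA lines ∧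
    ∀ p, iterB_go (some p) lines = (p, descOf lines) :: fA lines := by
  induction lines with
  | nil => simp [iterB_go, fA, descOf]
  | cons l rest ih =>
    obtain ⟨ih0, ihs⟩ := ih
    refine ⟨?_, ?_⟩
    · by_cases hI : PySem.Chars.startswith (PySem.Chars.strip l.toList)
          ['i','n','t','e','r','f','a','c','e',' '] = true
      · simp [iterB_go, fA, hI, ihs]
      · simp [iterB_go, fA, hI, ih0]
    · intro p
      by_cases hD : PySem.Chars.startswith (PySem.Chars.lower (PySem.Chars.strip l.toList))
          ['d','e','s','c','r','i','p','t','i','o','n',' '] = true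
      · have hI := desc_not_interface _ hD
        simp [iterB_go, fA, descOf, hD, hI, ih0]
      · by_cases hI : PySem.Chars.startswith (PySem.Chars.strip l.toList)
            ['i','n','t','e','r','f','a','c','e',' '] = true
        · simp [iterB_go, fA, descOf, hD, hI, ihs]
        · simp [iterB_go, fA, descOf, hD, hI, ih0]

set_option maxHeartbeats 1000000 in
theorem iterA_go_step (lines : List String) (i : Nat) (h : i < lines.length) :
    iterA_go lines i =
      (if PySem.Str.startswith (PySem.Str.strip (lines.getD i "")) "interface " then
        [(PySem.Str.strip (lines.getD i ""),
          if i + 1 < lines.length then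
            (if PySem.Str.startswith (PySem.Str.lower (PySem.Str.strip (lines.getD (i + 1) "")))
                "description "
             then PySem.Str.strip (lines.getD (i + 1) "") else "no description")
          else "no description")]
       else []) ++ iterA_go lines (i + 1) := by
  rw [iterA_go, dif_pos h]

set_option maxHeartbeats 1000000 in
theorem iterA_go_last (lines : List String) (i : Nat) (h : ¬ i < lines.length) :
    iterA_go lines i = [] := by
  rw [iterA_go, dif_neg h]

set_option maxHeartbeats 2000000 in
theorem iterA_fA (lines : List String) (i : Nat) :
    iterA_go lines i = fA (lines.drop i) := by
  by_cases h : i < lines.length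
  · have hdrop : lines.drop i = lines[i] :: lines.drop (i + 1) :=
      List.drop_eq_getElem_cons h
    have hrec : iterA_go lines (i + 1) = fA (lines.drop (i + 1)) := iterA_fA lines (i + 1)
    rw [iterA_go_step lines i h, hdrop]
    simp only [fA]
    rw [List.getD_eq_getElem lines "" h, hrec]
    congr 1
    by_cases hI : PySem.Str.startswith (PySem.Str.strip lines[i]) "interface " = true
    · rw [if_pos hI, if_pos hI]
      congr 2
      by_cases h2 : i + 1 < lines.length
      · have hdrop2 : lines.drop (i + 1) = lines[i + 1] :: lines.drop (i + 2) :=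
          List.drop_eq_getElem_cons h2
        rw [if_pos h2, hdrop2, List.getD_eq_getElem lines "" h2]
        simp [descOf]
      · rw [if_neg h2, List.drop_eq_nil_of_le (by omega)]
        simp [descOf]
    · rw [if_neg hI, if_neg hI]
  · rw [iterA_go_last lines i h, List.drop_eq_nil_of_le (by omega)]
    simp [fA]
termination_by lines.length - i

-- ===== VERDICT (by name: the statement is the Claim_ definition above) =====
theorem iter_interface_spec : Claim_equal_iter_interface := by
  intro config_text _
  unfold Spec_iter_interface iter_interface iter_interface_alt
  rw [(iterB_fA _).1, iterA_fA, List.drop_zero]
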